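-- pv_equiv track=rewrite | github.com/lairdgrouplancaster/probestation | probestation/stagecommands.py | coordinates_cleanup
-- ===== SOURCE A (Python) =====
-- def coordinates_cleanup(coords):            # supports only 1/256 microstep mode. modify for different microstep modes?
--     for n in range(3):
--         coords[n][0] = int(coords[n][0])
--         coords[n][1] = int(coords[n][1])
--         while coords[n][1] > 255:
--             coords[n][0] += 1
--             coords[n][1] -= 256
--         while coords[n][1] < -255:
--             coords[n][0] -= 1
--             coords[n][1] += 256
--         if coords[n][0] < 0 and coords[n][1] > 0:
--             coords[n][0] +=1
--             coords[n][1] = -256 + coords[n][1]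
--         if coords[n][0] > 0 and coords[n][1] < 0:
--             coords[n][0] -= 1
--             coords[n][1] = 256 - coords[n][1]
--     return coords
-- ===== SOURCE B (Python) =====
-- def _fix(a, b):
--     # divmod-based carry normalization (replaces the step-by-step while loops)
--     if b > 255:
--         q, b = divmod(b, 256)
--         a += q
--     elif b < -255:
--         q, r = divmod(-b, 256)
--         a -= q
--         b = -r
--     # same sign-correction as the original (branches are mutually exclusive)
--     if a < 0 and b > 0:
--         a += 1
--         b -= 256
--     elif a > 0 and b < 0:
--         a -= 1
--         b = 256 - b
--     return a, b
--
-- def coordinates_cleanup(coords):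
--     for n in range(3):
--         coords[n][0], coords[n][1] = _fix(int(coords[n][0]), int(coords[n][1]))
--     return coords
-- ===== Notes on version B (the rewrite author's own statement) =====
-- stated objective: alternative
-- what changed: Replaces the per-256-step while loops with a single divmod-based carry normalization per coordinate pair, keeping the same sign-correction branches.
import Mathlib
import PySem

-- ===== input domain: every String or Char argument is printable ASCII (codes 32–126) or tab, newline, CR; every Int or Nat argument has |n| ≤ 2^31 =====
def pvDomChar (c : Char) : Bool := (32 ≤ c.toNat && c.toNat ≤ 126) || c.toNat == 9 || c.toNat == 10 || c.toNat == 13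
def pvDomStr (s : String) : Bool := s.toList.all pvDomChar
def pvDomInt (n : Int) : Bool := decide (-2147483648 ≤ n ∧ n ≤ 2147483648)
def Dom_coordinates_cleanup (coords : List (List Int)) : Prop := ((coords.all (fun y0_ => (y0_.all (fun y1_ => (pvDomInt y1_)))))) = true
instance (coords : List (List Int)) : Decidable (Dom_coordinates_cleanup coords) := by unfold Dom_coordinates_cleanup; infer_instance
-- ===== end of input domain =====

-- B replaces A's step-by-step ±256 while loops with one divmod per pair (same sign-correction);
-- equivalence is about the return value; both Pythons mutate `coords` in place in the same way.

-- ===== PORT A =====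
-- while coords[n][1] > 255: coords[n][0] += 1; coords[n][1] -= 256
def pvA_loopDown (a b : Int) : Int × Int :=
  if b > 255 then pvA_loopDown (a + 1) (b - 256) else (a, b)
termination_by b.toNat
decreasing_by omega

-- while coords[n][1] < -255: coords[n][0] -= 1; coords[n][1] += 256
def pvA_loopUp (a b : Int) : Int × Int :=
  if b < -255 then pvA_loopUp (a - 1) (b + 256) else (a, b)
termination_by (-b).toNat
decreasing_by omega

-- the per-pair body of one iteration of A's `for n in range(3)` loop
def pvA_pair (a b : Int) : Int × Int :=
  let p1 := pvA_loopDown a b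
  let p2 := pvA_loopUp p1.1 p1.2
  let p3 := if p2.1 < 0 ∧ p2.2 > 0 then (p2.1 + 1, -256 + p2.2) else p2
  if p3.1 > 0 ∧ p3.2 < 0 then (p3.1 - 1, 256 - p3.2) else p3

def pvA_fix (row : List Int) : List Int :=
  match row with
  | a :: b :: rest => (pvA_pair a b).1 :: (pvA_pair a b).2 :: rest
  | _ => row

def coordinates_cleanup (coords : List (List Int)) : List (List Int) :=
  (List.range 3).foldl (fun cs n => cs.set n (pvA_fix (cs.getD n []))) coords

-- ===== PORT B =====
-- _fix: divmod-based carry normalization, then the same (mutually exclusive) sign-correction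
def pvB_pair (a b : Int) : Int × Int :=
  let p :=
    if b > 255 then (a + PySem.Int.floordiv b 256, PySem.Int.mod b 256)
    else if b < -255 then (a - PySem.Int.floordiv (-b) 256, -(PySem.Int.mod (-b) 256))
    else (a, b)
  if p.1 < 0 ∧ p.2 > 0 then (p.1 + 1, p.2 - 256)
  else if p.1 > 0 ∧ p.2 < 0 then (p.1 - 1, 256 - p.2)
  else p

def pvB_fix (row : List Int) : List Int :=
  match row with
  | a :: b :: rest => (pvB_pair a b).1 :: (pvB_pair a b).2 :: rest
  | _ => row

def coordinates_cleanup_alt (coords : List (List Int)) : List (List Int) :=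
  (List.range 3).foldl (fun cs n => cs.set n (pvB_fix (cs.getD n []))) coords

-- ===== PRECONDITION & SPEC =====
-- A raises IndexError unless coords has at least 3 rows and each of the first 3 rows has at least 2 entries.
def Pre_coordinates_cleanup (coords : List (List Int)) : Prop :=
  3 ≤ coords.length ∧ ∀ r ∈ coords.take 3, 2 ≤ r.length
instance (coords : List (List Int)) : Decidable (Pre_coordinates_cleanup coords) := by
  unfold Pre_coordinates_cleanup; infer_instance
def pvWitness_coordinates_cleanup : List (List Int) := [[0, 300], [-1, 5], [2, -700]]
def Spec_coordinates_cleanup (coords : List (List Int)) (out : List (List Int)) : Prop := out = coordinates_cleanup_alt coords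
instance (coords : List (List Int)) (out : List (List Int)) : Decidable (Spec_coordinates_cleanup coords out) := by unfold Spec_coordinates_cleanup; infer_instance

-- ===== CLAIM (what is proved, stated in full; the proofs are below) =====
def Claim_equal_coordinates_cleanup : Prop := ∀ (coords : List (List Int)), Dom_coordinates_cleanup coords → Pre_coordinates_cleanup coords → Spec_coordinates_cleanup coords (coordinates_cleanup coords)

-- ===== LEMMAS AND PROOFS =====
lemma pvA_loopDown_eq (a b : Int) (hb : 0 ≤ b) :
    pvA_loopDown a b = (a + PySem.Int.floordiv b 256, PySem.Int.mod b 256) := by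
  rw [PySem.Int.floordiv_eq_ediv_of_pos (by norm_num), PySem.Int.mod_eq_emod_of_pos (by norm_num)]
  induction a, b using pvA_loopDown.induct with
  | case1 a b h ih =>
    rw [pvA_loopDown, if_pos h, ih (by omega)]
    simp only [Prod.mk.injEq]; constructor <;> omega
  | case2 a b h =>
    rw [pvA_loopDown, if_neg h]
    simp only [Prod.mk.injEq]; constructor <;> omega

lemma pvA_loopUp_eq (a b : Int) (hb : b ≤ 0) :
    pvA_loopUp a b = (a - PySem.Int.floordiv (-b) 256, -(PySem.Int.mod (-b) 256)) := by
  rw [PySem.Int.floordiv_eq_ediv_of_pos (by norm_num), PySem.Int.mod_eq_emod_of_pos (by norm_num)]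
  induction a, b using pvA_loopUp.induct with
  | case1 a b h ih =>
    rw [pvA_loopUp, if_pos h, ih (by omega)]
    simp only [Prod.mk.injEq]; constructor <;> omega
  | case2 a b h =>
    rw [pvA_loopUp, if_neg h]
    simp only [Prod.mk.injEq]; constructor <;> omega

lemma pvPair_eq (a b : Int) : pvA_pair a b = pvB_pair a b := by
  by_cases hb : b > 255
  · -- b > 255 : loopDown does the work, loopUp is the identity
    have hm : PySem.Int.mod b 256 = b % 256 := PySem.Int.mod_eq_emod_of_pos (by norm_num)
    have h2 : 0 ≤ b % 256 := Int.emod_nonneg _ (by norm_num)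
    have h3 : b % 256 < 256 := Int.emod_lt_of_pos _ (by norm_num)
    have hD : pvA_loopDown a b = (a + PySem.Int.floordiv b 256, PySem.Int.mod b 256) :=
      pvA_loopDown_eq a b (by omega)
    have hU : pvA_loopUp (a + PySem.Int.floordiv b 256) (PySem.Int.mod b 256)
        = (a + PySem.Int.floordiv b 256, PySem.Int.mod b 256) := by
      rw [pvA_loopUp, if_neg (by omega)]
    simp only [pvA_pair, pvB_pair, hD, hU, if_pos hb]
    split_ifs <;> simp_all [Prod.ext_iff] <;> omega
  · by_cases hb2 : b < -255
    · -- b < -255 : loopDown is the identity, loopUp does the work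
      have hm : PySem.Int.mod (-b) 256 = (-b) % 256 := PySem.Int.mod_eq_emod_of_pos (by norm_num)
      have h2 : 0 ≤ (-b) % 256 := Int.emod_nonneg _ (by norm_num)
      have h3 : (-b) % 256 < 256 := Int.emod_lt_of_pos _ (by norm_num)
      have hD : pvA_loopDown a b = (a, b) := by rw [pvA_loopDown, if_neg (by omega)]
      have hU : pvA_loopUp a b = (a - PySem.Int.floordiv (-b) 256, -(PySem.Int.mod (-b) 256)) :=
        pvA_loopUp_eq a b (by omega)
      simp only [pvA_pair, pvB_pair, hD, hU, if_neg hb, if_pos hb2]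
      split_ifs <;> simp_all [Prod.ext_iff] <;> omega
    · -- -255 ≤ b ≤ 255 : both while loops and the divmod branches are the identity
      have hD : pvA_loopDown a b = (a, b) := by rw [pvA_loopDown, if_neg (by omega)]
      have hU : pvA_loopUp a b = (a, b) := by rw [pvA_loopUp, if_neg (by omega)]
      simp only [pvA_pair, pvB_pair, hD, hU, if_neg hb, if_neg hb2]
      split_ifs <;> simp_all [Prod.ext_iff] <;> omega

lemma pvFix_eq (row : List Int) : pvA_fix row = pvB_fix row := by
  match row with
  | [] => rfl
  | [_] => rfl
  | a :: b :: rest => simp only [pvA_fix, pvB_fix, pvPair_eq]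

-- ===== VERDICT (by name: the statement is the Claim_ definition above) =====
theorem coordinates_cleanup_spec : Claim_equal_coordinates_cleanup := by
  intro coords _ _
  unfold Spec_coordinates_cleanup coordinates_cleanup coordinates_cleanup_alt
  simp [pvFix_eq]
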